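-- pv_equiv track=rewrite | github.com/jskim7018/leetcode_study | algorithm_study/2025/04/20250401/daily_20/LC_2718.py | matrixSumQueries
-- ===== SOURCE A (Python) =====
-- from typing import List
--
-- def matrixSumQueries(n: int, queries: List[List[int]]) -> int:
--
--     ans = 0
--     row_st = set()
--     col_st = set()
--     for i in range(len(queries)-1, -1,-1):
--         type = queries[i][0]
--         idx = queries[i][1]
--         val = queries[i][2]
--
--         if type == 0:
--             if idx not in row_st:
--                 ans += (n-len(col_st))*val
--                 row_st.add(idx)
--         else:
--             if idx not in col_st:
--                 ans += (n-len(row_st))*val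
--                 col_st.add(idx)
--
--     return ans
-- ===== SOURCE B (Python) =====
-- from typing import List
--
-- def matrixSumQueries(n: int, queries: List[List[int]]) -> int:
--     # A query "survives" iff no later query targets the same row/column.
--     # Each surviving query paints val on the n cells of its line minus the
--     # cells that surviving later perpendicular queries overwrite.
--     def kind(q):
--         return 0 if q[0] == 0 else 1
--
--     def alive(q, rest):
--         return all(not (kind(r) == kind(q) and r[1] == q[1]) for r in rest)
--
--     def opp(k, rest):
--         return sum(1 for j, r in enumerate(rest)
--                    if kind(r) != k and alive(r, rest[j + 1:]))
--
--     total = 0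
--     for i, q in enumerate(queries):
--         rest = queries[i + 1:]
--         if alive(q, rest):
--             total += q[2] * (n - opp(kind(q), rest))
--     return total
-- ===== Notes on version B (the rewrite author's own statement) =====
-- stated objective: alternative
-- what changed: Replaces A's reverse sweep that maintains seen-row/seen-column sets by a forward quantifier-based scan: a query counts iff no later query hits the same line ('alive'), and its contribution is val*(n - number of alive later perpendicular queries); no sets or reverse iteration are kept.
-- outside the precondition, e.g. on matrixSumQueries(3, [[0, 1]]): A raises IndexError, B raises IndexError
import Mathlib
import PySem

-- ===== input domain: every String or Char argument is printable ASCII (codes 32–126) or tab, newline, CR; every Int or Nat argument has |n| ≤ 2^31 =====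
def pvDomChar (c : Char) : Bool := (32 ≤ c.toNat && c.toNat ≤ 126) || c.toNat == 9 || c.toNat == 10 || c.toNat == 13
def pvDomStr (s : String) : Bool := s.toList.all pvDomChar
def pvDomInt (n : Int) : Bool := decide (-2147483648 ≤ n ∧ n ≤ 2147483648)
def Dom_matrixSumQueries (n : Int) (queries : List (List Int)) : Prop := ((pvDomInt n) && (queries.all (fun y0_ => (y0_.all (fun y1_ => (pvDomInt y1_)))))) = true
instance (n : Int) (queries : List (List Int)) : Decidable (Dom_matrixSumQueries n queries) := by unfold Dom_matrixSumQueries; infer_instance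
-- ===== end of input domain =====

-- B replaces A's reverse sweep with seen-sets by a forward alive/lookahead scan (alternative algorithm, not faster).

-- ===== PORT A =====
-- one reverse-loop iteration of A: state = (ans, row_st, col_st)
def pvAStep (n : Int) (st : Int × PySem.Set Int × PySem.Set Int) (q : List Int) :
    Int × PySem.Set Int × PySem.Set Int :=
  let type := PySem.List.pyGetD q 0 0
  let idx := PySem.List.pyGetD q 1 0
  let val := PySem.List.pyGetD q 2 0
  if type = 0 then
    if ¬ (PySem.Set.contains st.2.1 idx) then
      (st.1 + (n - PySem.Set.len st.2.2) * val, PySem.Set.add st.2.1 idx, st.2.2)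
    else st
  else
    if ¬ (PySem.Set.contains st.2.2 idx) then
      (st.1 + (n - PySem.Set.len st.2.1) * val, st.2.1, PySem.Set.add st.2.2 idx)
    else st

-- 'for i in range(len(queries)-1, -1, -1): … queries[i] …' visits queries in reverse
def matrixSumQueries (n : Int) (queries : List (List Int)) : Int :=
  (queries.reverse.foldl (pvAStep n) (0, PySem.Set.empty, PySem.Set.empty)).1

-- ===== PORT B =====
def pvKind (q : List Int) : Int :=
  if PySem.List.pyGetD q 0 0 = 0 then 0 else 1

def pvAlive (q : List Int) (rest : List (List Int)) : Bool :=
  rest.all (fun r => !(pvKind r == pvKind q && PySem.List.pyGetD r 1 0 == PySem.List.pyGetD q 1 0))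

-- sum over enumerate(rest) with suffix rest[j+1:]
def pvOpp (k : Int) : List (List Int) → Int
  | [] => 0
  | r :: rs => (if pvKind r ≠ k ∧ pvAlive r rs then 1 else 0) + pvOpp k rs

-- the forward loop with accumulator 'total'; rest = queries[i+1:]
def pvBGo (n : Int) (total : Int) : List (List Int) → Int
  | [] => total
  | q :: rest =>
      pvBGo n
        (if pvAlive q rest then total + PySem.List.pyGetD q 2 0 * (n - pvOpp (pvKind q) rest)
         else total) rest

def matrixSumQueries_alt (n : Int) (queries : List (List Int)) : Int :=
  pvBGo n 0 queries

-- ===== PRECONDITION & SPEC =====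
-- A raises IndexError on any query row with fewer than 3 entries; Pre_ excludes exactly those.
def Pre_matrixSumQueries (n : Int) (queries : List (List Int)) : Prop :=
  ∀ q ∈ queries, 3 ≤ q.length

instance (n : Int) (queries : List (List Int)) : Decidable (Pre_matrixSumQueries n queries) := by
  unfold Pre_matrixSumQueries; infer_instance

def pvWitness_matrixSumQueries : Int × List (List Int) := (3, [[0, 1, 5], [1, 1, 2]])

def Spec_matrixSumQueries (n : Int) (queries : List (List Int)) (out : Int) : Prop := out = matrixSumQueries_alt n queries
instance (n : Int) (queries : List (List Int)) (out : Int) : Decidable (Spec_matrixSumQueries n queries out) := by unfold Spec_matrixSumQueries; infer_instance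

-- ===== CLAIM (what is proved, stated in full; the proofs are below) =====
def Claim_equal_matrixSumQueries : Prop := ∀ (n : Int) (queries : List (List Int)), Dom_matrixSumQueries n queries → Pre_matrixSumQueries n queries → Spec_matrixSumQueries n queries (matrixSumQueries n queries)

-- ===== LEMMAS AND PROOFS =====

-- the set of row indices touched in qs (A builds it while sweeping backwards)
def pvRSet : List (List Int) → PySem.Set Int
  | [] => PySem.Set.empty
  | q :: qs => if pvKind q = 0 then PySem.Set.add (pvRSet qs) (PySem.List.pyGetD q 1 0) else pvRSet qs

def pvCSet : List (List Int) → PySem.Set Int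
  | [] => PySem.Set.empty
  | q :: qs => if pvKind q = 0 then pvCSet qs else PySem.Set.add (pvCSet qs) (PySem.List.pyGetD q 1 0)

-- pure sum of B's contributions
def pvBSum (n : Int) : List (List Int) → Int
  | [] => 0
  | q :: qs => (if pvAlive q qs then PySem.List.pyGetD q 2 0 * (n - pvOpp (pvKind q) qs) else 0) + pvBSum n qs

lemma pvBGo_eq (n total : Int) (qs : List (List Int)) : pvBGo n total qs = total + pvBSum n qs := by
  induction qs generalizing total with
  | nil => simp [pvBGo, pvBSum]
  | cons q qs ih => simp only [pvBGo, pvBSum, ih]; split_ifs <;> ring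

lemma pvMem_rset (x : Int) (qs : List (List Int)) :
    x ∈ pvRSet qs ↔ ∃ q ∈ qs, pvKind q = 0 ∧ PySem.List.pyGetD q 1 0 = x := by
  induction qs with
  | nil => simp [pvRSet, PySem.Set.empty]
  | cons q qs ih =>
      by_cases h : pvKind q = 0 <;>
        simp [pvRSet, h, PySem.Set.mem_add, ih, eq_comm] <;> aesop

lemma pvMem_cset (x : Int) (qs : List (List Int)) :
    x ∈ pvCSet qs ↔ ∃ q ∈ qs, pvKind q ≠ 0 ∧ PySem.List.pyGetD q 1 0 = x := by
  induction qs with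
  | nil => simp [pvCSet, PySem.Set.empty]
  | cons q qs ih =>
      by_cases h : pvKind q = 0 <;>
        simp [pvCSet, h, PySem.Set.mem_add, ih, eq_comm] <;> aesop

lemma pvKind_cases (q : List Int) : pvKind q = 0 ∨ pvKind q = 1 := by
  unfold pvKind; split_ifs <;> simp

lemma pvAlive_iff (q : List Int) (qs : List (List Int)) :
    pvAlive q qs = true ↔
      PySem.List.pyGetD q 1 0 ∉ (if pvKind q = 0 then pvRSet qs else pvCSet qs) := by
  by_cases h : pvKind q = 0
  · rw [if_pos h, pvMem_rset]
    unfold pvAlive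
    rw [List.all_eq_true]
    constructor
    · intro hall hex
      obtain ⟨r, hr, hk, hx⟩ := hex
      have := hall r hr
      simp [hk, h, hx] at this
    · intro hnot r hr
      by_cases hk : pvKind r = pvKind q
      · by_cases hx : PySem.List.pyGetD r 1 0 = PySem.List.pyGetD q 1 0
        · exact absurd ⟨r, hr, hk.trans h, hx⟩ hnot
        · simp [hx]
      · simp [hk]
  · rw [if_neg h, pvMem_cset]
    unfold pvAlive
    rw [List.all_eq_true]
    constructor
    · intro hall hex
      obtain ⟨r, hr, hk, hx⟩ := hex
      have hk1 : pvKind r = pvKind q := by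
        rcases pvKind_cases r with h0 | h1
        · exact absurd h0 hk
        · rcases pvKind_cases q with q0 | q1
          · exact absurd q0 h
          · rw [h1, q1]
      have := hall r hr
      simp [hk1, hx] at this
    · intro hnot r hr
      by_cases hk : pvKind r = pvKind q
      · by_cases hx : PySem.List.pyGetD r 1 0 = PySem.List.pyGetD q 1 0
        · refine absurd ⟨r, hr, ?_, hx⟩ hnot
          rw [hk]; exact h
        · simp [hx]
      · simp [hk]

lemma pvOpp_len (qs : List (List Int)) :
    pvOpp 0 qs = PySem.Set.len (pvCSet qs) ∧ pvOpp 1 qs = PySem.Set.len (pvRSet qs) := by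
  induction qs with
  | nil => simp [pvOpp, pvRSet, pvCSet, PySem.Set.len, PySem.Set.empty]
  | cons q qs ih =>
      obtain ⟨ihc, ihr⟩ := ih
      have ha := pvAlive_iff q qs
      rcases pvKind_cases q with h | h
      · refine ⟨by simp [pvOpp, pvCSet, h, ihc], ?_⟩
        by_cases hm : PySem.List.pyGetD q 1 0 ∈ pvRSet qs
        · have hal : pvAlive q qs = false := by
            rw [Bool.eq_false_iff]; simp [ha, h, hm]
          simp [pvOpp, pvRSet, h, hal, ihr, PySem.Set.add_of_mem hm]
        · have hal : pvAlive q qs = true := by simp [ha, h, hm]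
          simp [pvOpp, pvRSet, h, hal, ihr, PySem.Set.add_of_not_mem hm, PySem.Set.len]
          omega
      · have h0 : ¬ (pvKind q = 0) := by rw [h]; decide
        refine ⟨?_, by simp [pvOpp, pvRSet, h0, h, ihr]⟩
        by_cases hm : PySem.List.pyGetD q 1 0 ∈ pvCSet qs
        · have hal : pvAlive q qs = false := by
            rw [Bool.eq_false_iff]; simp [ha, h0, hm]
          simp [pvOpp, pvCSet, h0, h, hal, ihc, PySem.Set.add_of_mem hm]
        · have hal : pvAlive q qs = true := by simp [ha, h0, hm]
          simp [pvOpp, pvCSet, h0, h, hal, ihc, PySem.Set.add_of_not_mem hm, PySem.Set.len]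
          omega

lemma pvFoldr_eq (n : Int) (qs : List (List Int)) :
    qs.foldr (fun q st => pvAStep n st q) ((0 : Int), PySem.Set.empty, PySem.Set.empty)
      = (pvBSum n qs, pvRSet qs, pvCSet qs) := by
  induction qs with
  | nil => simp [pvRSet, pvCSet, pvBSum]
  | cons q qs ih =>
      simp only [List.foldr_cons, ih]
      have ha := pvAlive_iff q qs
      obtain ⟨hc, hr⟩ := pvOpp_len qs
      rcases pvKind_cases q with h | h
      · have ht : PySem.List.pyGetD q 0 0 = 0 := by
          by_contra hne; simp [pvKind, hne] at h
        by_cases hm : PySem.List.pyGetD q 1 0 ∈ pvRSet qs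
        · have hct : PySem.Set.contains (pvRSet qs) (PySem.List.pyGetD q 1 0) = true :=
            (PySem.Set.contains_iff _ _).2 hm
          have hal : pvAlive q qs = false := by
            rw [Bool.eq_false_iff]; simp [ha, h, hm]
          simp [pvAStep, ht, hct, pvBSum, pvRSet, pvCSet, h, hal, PySem.Set.add_of_mem hm]
          intro hh; exact absurd hm hh
        · have hct : PySem.Set.contains (pvRSet qs) (PySem.List.pyGetD q 1 0) = false := by
            rw [Bool.eq_false_iff]; intro hcc
            exact hm ((PySem.Set.contains_iff _ _).1 hcc)
          have hal : pvAlive q qs = true := by simp [ha, h, hm]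
          have hA : pvAStep n (pvBSum n qs, pvRSet qs, pvCSet qs) q
              = (pvBSum n qs + (n - PySem.Set.len (pvCSet qs)) * PySem.List.pyGetD q 2 0,
                 PySem.Set.add (pvRSet qs) (PySem.List.pyGetD q 1 0), pvCSet qs) := by
            simp [pvAStep, ht, hct]
            intro hh; exact absurd hh hm
          rw [hA]
          simp only [pvBSum, pvRSet, pvCSet, h, if_pos (rfl : (0:Int) = 0), hal, if_pos rfl,
            Prod.mk.injEq]
          refine ⟨?_, rfl, rfl⟩
          rw [hc]; simp only [if_true, reduceIte]; ring
      · have ht : ¬ (PySem.List.pyGetD q 0 0 = 0) := by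
          intro h0; simp [pvKind, h0] at h
        have h0 : ¬ (pvKind q = 0) := by rw [h]; decide
        by_cases hm : PySem.List.pyGetD q 1 0 ∈ pvCSet qs
        · have hct : PySem.Set.contains (pvCSet qs) (PySem.List.pyGetD q 1 0) = true :=
            (PySem.Set.contains_iff _ _).2 hm
          have hal : pvAlive q qs = false := by
            rw [Bool.eq_false_iff]; simp [ha, h0, hm]
          simp [pvAStep, ht, hct, pvBSum, pvRSet, pvCSet, h0, hal, PySem.Set.add_of_mem hm]
          intro hh; exact absurd hm hh
        · have hct : PySem.Set.contains (pvCSet qs) (PySem.List.pyGetD q 1 0) = false := by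
            rw [Bool.eq_false_iff]; intro hcc
            exact hm ((PySem.Set.contains_iff _ _).1 hcc)
          have hal : pvAlive q qs = true := by simp [ha, h0, hm]
          have hA : pvAStep n (pvBSum n qs, pvRSet qs, pvCSet qs) q
              = (pvBSum n qs + (n - PySem.Set.len (pvRSet qs)) * PySem.List.pyGetD q 2 0,
                 pvRSet qs, PySem.Set.add (pvCSet qs) (PySem.List.pyGetD q 1 0)) := by
            simp [pvAStep, ht, hct]
            intro hh; exact absurd hh hm
          rw [hA]
          simp only [pvBSum, pvRSet, pvCSet, h0, if_neg h0, hal, if_pos rfl, Prod.mk.injEq]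
          refine ⟨?_, rfl, rfl⟩
          rw [h, ← hr]; simp only [if_true, reduceIte]; ring

-- ===== VERDICT (by name: the statement is the Claim_ definition above) =====
theorem matrixSumQueries_spec : Claim_equal_matrixSumQueries := by
  intro n queries _ _
  unfold Spec_matrixSumQueries matrixSumQueries matrixSumQueries_alt
  rw [List.foldl_reverse, pvFoldr_eq, pvBGo_eq]
  simp
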